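-- pv_equiv track=rewrite | github.com/IBM/unitxt | src/unitxt/dialog_operators.py | merge_dialog_entries
-- ===== SOURCE A (Python) =====
-- from typing import Any, Dict, List, Optional
--
-- def merge_dialog_entries(dialog: List[Dict[str, str]]) -> List[Dict[str, str]]:
--     """Merges consecutive dialog entries with the same role.
--
--     Args:
--         dialog (List[Dict[str, str]]): The input dialog list where each dictionary has a 'role' and 'content'.
--
--     Returns:
--         List[Dict[str, str]]: A new list where consecutive entries with the same role are merged.
--     """
--     if len(dialog) == 0:
--         return []
--
--     merged_dialog = [dialog[0]]
--
--     for entry in dialog[1:]: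
--         if entry["role"] == merged_dialog[-1]["role"]:
--             merged_dialog[-1]["content"] += " " + entry["content"]
--         else:
--             merged_dialog.append(entry)
--
--     return merged_dialog
-- ===== SOURCE B (Python) =====
-- from typing import Any, Dict, List, Optional
--
--
-- def _collapse_run(run):
--     first = run[0]
--     if len(run) > 1:
--         first["content"] = " ".join(e["content"] for e in run)
--     return first
--
--
-- def merge_dialog_entries(dialog: List[Dict[str, str]]) -> List[Dict[str, str]]:
--     """Merges consecutive dialog entries with the same role.
--
--     Two staged passes: first group the dialog into maximal runs of
--     consecutive same-role entries (no content is touched), then collapse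
--     each run into its first entry, whose content becomes the single-space
--     join of the run's contents (mutated in place, as in the original).
--     """
--     runs = []
--     for entry in dialog:
--         if runs and runs[-1][0]["role"] == entry["role"]:
--             runs[-1].append(entry)
--         else:
--             runs.append([entry])
--     return [_collapse_run(run) for run in runs]
-- ===== Notes on version B (the rewrite author's own statement) =====
-- stated objective: alternative
-- what changed: B replaces A's single merge-as-you-go pass (append-or-fold into the result's last element) by two staged passes: first group the dialog into explicit runs of consecutive same-role entries without touching any content, then collapse each run into its first entry with one single-space join of the run's contents.
import Mathlib
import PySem

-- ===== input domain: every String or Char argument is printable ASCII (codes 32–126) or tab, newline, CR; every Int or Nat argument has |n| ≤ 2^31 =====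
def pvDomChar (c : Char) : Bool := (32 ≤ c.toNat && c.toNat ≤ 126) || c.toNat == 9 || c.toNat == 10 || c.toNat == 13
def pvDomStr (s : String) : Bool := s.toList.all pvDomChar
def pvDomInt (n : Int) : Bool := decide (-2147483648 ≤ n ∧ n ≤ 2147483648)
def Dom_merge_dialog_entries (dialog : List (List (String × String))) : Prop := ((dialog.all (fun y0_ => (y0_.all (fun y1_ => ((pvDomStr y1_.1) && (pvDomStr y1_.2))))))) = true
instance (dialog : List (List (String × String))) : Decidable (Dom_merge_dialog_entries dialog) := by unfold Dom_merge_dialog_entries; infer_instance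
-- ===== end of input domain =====

-- B replaces A's single merge-as-you-go pass by two staged passes (group into runs, then
-- collapse each run with a single-space join); both Pythons mutate the run-first dicts in
-- place, and the equivalence proved here is about the return value.

-- shared dict primitives over the association-list encoding of a Python dict:
-- d[k] lookup (first match; none = KeyError, excluded by Pre_)
def pvGetKey (e : List (String × String)) (k : String) : Option String :=
  (e.find? (fun p => p.1 == k)).map (·.2)

-- d[k] = v : overwrite the value at the first occurrence of k in place; append if absent
def pvSetKey : List (String × String) → String → String → List (String × String)
  | [], k, v => [(k, v)]
  | (k', v') :: t, k, v => if k' == k then (k, v) :: t else (k', v') :: pvSetKey t k v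

-- ===== PORT A =====
-- A's loop body; the merged list is kept REVERSED so that merged_dialog[-1] is the head
def mergeA_step (acc : List (List (String × String))) (entry : List (String × String)) :
    List (List (String × String)) :=
  match acc with
  | [] => [entry]  -- unreachable: acc starts as [dialog[0]]
  | last :: t =>
      if pvGetKey entry "role" == pvGetKey last "role" then
        pvSetKey last "content"
          (((pvGetKey last "content").getD "") ++ " " ++ ((pvGetKey entry "content").getD "")) :: t
      else entry :: last :: t

def merge_dialog_entries (dialog : List (List (String × String))) : List (List (String × String)) :=
  match dialog with
  | [] => []
  | d0 :: rest => (rest.foldl mergeA_step [d0]).reverse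

-- ===== PORT B =====
-- B's first pass body: append entry to the last run if its first entry has the same role,
-- else start a new run at the end (runs[-1][0] is pyGet? run 0, always in range)
def mergeB_group (runs : List (List (List (String × String)))) (entry : List (String × String)) :
    List (List (List (String × String))) :=
  match runs.getLast? with
  | none => runs ++ [[entry]]
  | some last =>
      if pvGetKey ((PySem.List.pyGet? last 0).getD []) "role" == pvGetKey entry "role" then
        runs.dropLast ++ [last ++ [entry]]
      else runs ++ [[entry]]

-- B's _collapse_run: the run's first entry, its content replaced by the join when len > 1
def mergeB_collapse (run : List (List (String × String))) : List (String × String) :=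
  let first := (PySem.List.pyGet? run 0).getD ([] : List (String × String))
  if 1 < run.length then
    pvSetKey first "content"
      (PySem.Str.join " " (run.map (fun e => (pvGetKey e "content").getD "")))
  else first

def merge_dialog_entries_alt (dialog : List (List (String × String))) :
    List (List (String × String)) :=
  (dialog.foldl mergeB_group []).map mergeB_collapse

-- ===== PRECONDITION & SPEC =====
-- does the dict have key k ('k in d')
def pvHasKey (e : List (String × String)) (k : String) : Bool :=
  e.any (fun p => p.1 == k)

-- Exactly the inputs on which A returns (no KeyError): with at least two entries, every entry
-- has a "role" key and adjacent equal-role entries both have a "content" key.  Duplicate-key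
-- association lists are also excluded: they do not denote a Python dict (dict construction
-- collapses them), so they never reach A.
def Pre_merge_dialog_entries (dialog : List (List (String × String))) : Prop :=
  (dialog.all (fun e => decide (e.map Prod.fst).Nodup)) = true ∧
  (dialog.length ≤ 1 ∨
    ((dialog.all (fun e => pvHasKey e "role")) = true ∧
     ((dialog.zip dialog.tail).all (fun p =>
        (pvGetKey p.1 "role" != pvGetKey p.2 "role")
          || (pvHasKey p.1 "content" && pvHasKey p.2 "content"))) = true))
instance (dialog : List (List (String × String))) : Decidable (Pre_merge_dialog_entries dialog) := by
  unfold Pre_merge_dialog_entries; infer_instance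

def pvWitness_merge_dialog_entries : (List (List (String × String))) :=
  [[("role", "user"), ("content", "hi")], [("role", "user"), ("content", "there")],
   [("role", "agent"), ("content", "hello")]]

def Spec_merge_dialog_entries (dialog : List (List (String × String))) (out : List (List (String × String))) : Prop := out = merge_dialog_entries_alt dialog
instance (dialog : List (List (String × String))) (out : List (List (String × String))) : Decidable (Spec_merge_dialog_entries dialog out) := by unfold Spec_merge_dialog_entries; infer_instance

-- ===== CLAIM (what is proved, stated in full; the proofs are below) =====
def Claim_equal_merge_dialog_entries : Prop := ∀ (dialog : List (List (String × String))), Dom_merge_dialog_entries dialog → Pre_merge_dialog_entries dialog → Spec_merge_dialog_entries dialog (merge_dialog_entries dialog)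

-- ===== LEMMAS AND PROOFS =====

-- A's algorithm restated as a run recursion (proof-only bridge between the two ports):
-- consume the maximal run at the head, then recurse on the remainder
def mergeR_run (first : List (String × String)) (role : Option String) :
    List (List (String × String)) → (List (String × String)) × List (List (String × String))
  | [] => (first, [])
  | e :: t =>
      if pvGetKey e "role" == role then
        mergeR_run (pvSetKey first "content"
          (((pvGetKey first "content").getD "") ++ " " ++ ((pvGetKey e "content").getD ""))) role t
      else (first, e :: t)

theorem mergeR_run_snd_length :
    ∀ (l : List (List (String × String))) (first : List (String × String)) (role : Option String),
      (mergeR_run first role l).2.length ≤ l.length := by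
  intro l
  induction l with
  | nil => intro first role; simp [mergeR_run]
  | cons e t ih =>
      intro first role
      by_cases h : pvGetKey e "role" == role
      · simp only [mergeR_run, h, if_pos]
        exact Nat.le_succ_of_le (ih _ _)
      · simp [mergeR_run, h]

def mergeRec (dialog : List (List (String × String))) : List (List (String × String)) :=
  match dialog with
  | [] => []
  | first :: rest =>
      let r := mergeR_run first (pvGetKey first "role") rest
      r.1 :: mergeRec r.2
termination_by dialog.length
decreasing_by
  simp only [List.length_cons]
  exact Nat.lt_succ_of_le (mergeR_run_snd_length rest first (pvGetKey first "role"))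

-- setting "content" leaves the "role" lookup unchanged
theorem pvGetKey_pvSetKey_ne (e : List (String × String)) (k k' v : String) (h : k' ≠ k) :
    pvGetKey (pvSetKey e k v) k' = pvGetKey e k' := by
  induction e with
  | nil => simp [pvSetKey, pvGetKey, List.find?, Ne.symm h]
  | cons p t ih =>
      obtain ⟨pk, pv⟩ := p
      by_cases hk : pk = k
      · subst hk
        have hne : (pk == k') = false := by simpa using Ne.symm h
        simp [pvSetKey, pvGetKey, hne]
      · have hne : (pk == k) = false := by simpa using hk
        simp only [pvSetKey, hne, Bool.false_eq_true, if_neg, not_false_iff]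
        simp only [pvGetKey, List.find?_cons]
        by_cases hpk' : pk == k'
        · simp [hpk']
        · simp only [hpk']
          exact ih

-- A's foldl from a reversed accumulator last :: t equals t.reverse followed by the run recursion
theorem loop_eq :
    ∀ (l : List (List (String × String))) (last : List (String × String))
      (t : List (List (String × String))),
      (l.foldl mergeA_step (last :: t)).reverse =
        t.reverse ++ ((mergeR_run last (pvGetKey last "role") l).1 ::
          mergeRec (mergeR_run last (pvGetKey last "role") l).2) := by
  intro l
  induction l with
  | nil =>
      intro last t
      simp [mergeR_run, mergeRec]
  | cons e l' ih =>
      intro last t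
      by_cases h : pvGetKey e "role" == pvGetKey last "role"
      · simp only [List.foldl_cons, mergeA_step, h, if_pos, mergeR_run]
        set last' := pvSetKey last "content"
          (((pvGetKey last "content").getD "") ++ " " ++ ((pvGetKey e "content").getD "")) with hlast'
        have hrole : pvGetKey last' "role" = pvGetKey last "role" :=
          pvGetKey_pvSetKey_ne last "content" "role" _ (by decide)
        rw [ih last' t, hrole]
      · simp only [List.foldl_cons, mergeA_step, h, if_neg, Bool.false_eq_true, not_false_iff,
          mergeR_run]
        rw [ih e (last :: t)]
        simp only [List.reverse_cons, List.append_assoc, List.cons_append, List.nil_append]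
        congr 1
        rw [mergeRec]

theorem a_eq_mergeRec (dialog : List (List (String × String))) :
    merge_dialog_entries dialog = mergeRec dialog := by
  match dialog with
  | [] => simp [merge_dialog_entries, mergeRec]
  | d0 :: rest =>
      show (rest.foldl mergeA_step [d0]).reverse = _
      rw [loop_eq rest d0 [], mergeRec]
      simp

-- abbreviations used only by the proofs
def pvG (e : List (String × String)) : String := (pvGetKey e "content").getD ""

def pvRRole (run : List (List (String × String))) : Option String :=
  pvGetKey ((PySem.List.pyGet? run 0).getD ([] : List (String × String))) "role"

def pvFoldSet (first : List (String × String)) (cs : List (List (String × String))) :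
    List (String × String) :=
  cs.foldl (fun f e => pvSetKey f "content" (pvG f ++ " " ++ pvG e)) first

theorem pvRRole_cons (first : List (String × String)) (t : List (List (String × String))) :
    pvRRole (first :: t) = pvGetKey first "role" := by
  simp [pvRRole]

-- mergeB_group never returns [] and only touches the last run
theorem group_ne_nil (runs : List (List (List (String × String))))
    (e : List (String × String)) : mergeB_group runs e ≠ [] := by
  unfold mergeB_group
  cases h : runs.getLast? with
  | none => simp
  | some last =>
      simp only []
      split <;> simp

theorem foldl_group_prefix :
    ∀ (l : List (List (String × String))) (A B : List (List (List (String × String)))),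
      B ≠ [] → List.foldl mergeB_group (A ++ B) l = A ++ List.foldl mergeB_group B l := by
  intro l
  induction l with
  | nil => intro A B _; simp
  | cons e t ih =>
      intro A B hB
      have hlast : (A ++ B).getLast? = B.getLast? := List.getLast?_append_of_ne_nil A hB
      have hdrop : (A ++ B).dropLast = A ++ B.dropLast := List.dropLast_append_of_ne_nil hB
      have hstep : mergeB_group (A ++ B) e = A ++ mergeB_group B e := by
        unfold mergeB_group
        rw [hlast, hdrop]
        cases h : B.getLast? with
        | none => simp
        | some last =>
            by_cases hc : pvGetKey ((PySem.List.pyGet? last 0).getD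
                ([] : List (String × String))) "role" = pvGetKey e "role" <;>
              simp [hc, List.append_assoc]
      simp only [List.foldl_cons, hstep]
      exact ih A (mergeB_group B e) (group_ne_nil B e)

-- grouping from a single open run: the run absorbs the maximal same-role prefix
theorem foldl_group_run :
    ∀ (l : List (List (String × String))) (run : List (List (String × String))),
      run ≠ [] →
      List.foldl mergeB_group [run] l =
        (run ++ l.takeWhile (fun e => pvGetKey e "role" == pvRRole run)) ::
          List.foldl mergeB_group []
            (l.dropWhile (fun e => pvGetKey e "role" == pvRRole run)) := by
  intro l
  induction l with
  | nil => intro run _; simp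
  | cons e t ih =>
      intro run hrun
      obtain ⟨r0, rs, rfl⟩ : ∃ r0 rs, run = r0 :: rs := by
        cases run with
        | nil => exact absurd rfl hrun
        | cons a b => exact ⟨a, b, rfl⟩
      have hr0 : pvRRole (r0 :: rs) = pvGetKey r0 "role" := pvRRole_cons r0 rs
      by_cases h : pvGetKey e "role" == pvRRole (r0 :: rs)
      · have hEq : pvGetKey e "role" = pvGetKey r0 "role" := by
          rw [hr0] at h; exact eq_of_beq h
        have hstep : mergeB_group [r0 :: rs] e = [(r0 :: rs) ++ [e]] := by
          unfold mergeB_group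
          simp [hEq]
        have hr' : pvRRole ((r0 :: rs) ++ [e]) = pvRRole (r0 :: rs) := by
          simp [pvRRole, List.cons_append]
        simp only [List.foldl_cons, hstep]
        rw [ih ((r0 :: rs) ++ [e]) (by simp), hr']
        have htake : List.takeWhile (fun x => pvGetKey x "role" == pvRRole (r0 :: rs)) (e :: t)
            = e :: List.takeWhile (fun x => pvGetKey x "role" == pvRRole (r0 :: rs)) t := by
          simp [h]
        have hdropw : List.dropWhile (fun x => pvGetKey x "role" == pvRRole (r0 :: rs)) (e :: t)
            = List.dropWhile (fun x => pvGetKey x "role" == pvRRole (r0 :: rs)) t := by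
          simp [h]
        rw [htake, hdropw]
        simp [List.append_assoc]
      · have hNe : ¬ pvGetKey e "role" = pvGetKey r0 "role" := by
          rw [hr0] at h; simpa using h
        have hstep : mergeB_group [r0 :: rs] e = [r0 :: rs] ++ [[e]] := by
          unfold mergeB_group
          simp [Ne.symm hNe]
        have hfalse : (pvGetKey e "role" == pvRRole (r0 :: rs)) = false := by
          simpa using h
        simp only [List.foldl_cons, hstep]
        rw [foldl_group_prefix t [r0 :: rs] [[e]] (by simp)]
        have hstart : mergeB_group [] e = [[e]] := by unfold mergeB_group; simp
        have htake : List.takeWhile (fun x => pvGetKey x "role" == pvRRole (r0 :: rs)) (e :: t)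
            = [] := by
          simp [hfalse]
        have hdropw : List.dropWhile (fun x => pvGetKey x "role" == pvRRole (r0 :: rs)) (e :: t)
            = e :: t := by
          simp [hfalse]
        rw [htake, hdropw]
        simp [List.foldl_cons, hstart]

-- the run recursion of A splits as takeWhile/dropWhile with the content fold
theorem mergeR_run_eq :
    ∀ (l : List (List (String × String))) (first : List (String × String)) (r : Option String),
      mergeR_run first r l =
        (pvFoldSet first (l.takeWhile (fun e => pvGetKey e "role" == r)),
         l.dropWhile (fun e => pvGetKey e "role" == r)) := by
  intro l
  induction l with
  | nil => intro first r; simp [mergeR_run, pvFoldSet]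
  | cons e t ih =>
      intro first r
      by_cases h : pvGetKey e "role" == r
      · simp only [mergeR_run, h, if_pos, List.takeWhile_cons, List.dropWhile_cons]
        rw [ih]
        simp [pvFoldSet, pvG]
      · simp [mergeR_run, h, pvFoldSet]

theorem pvGetKey_pvSetKey_self (e : List (String × String)) (k v : String) :
    pvGetKey (pvSetKey e k v) k = some v := by
  induction e with
  | nil => simp [pvSetKey, pvGetKey]
  | cons p t ih =>
      obtain ⟨pk, pv⟩ := p
      by_cases hk : pk == k
      · simp [pvSetKey, hk, pvGetKey]
      · simp only [pvSetKey, hk, Bool.false_eq_true, if_neg, not_false_iff]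
        simp only [pvGetKey, List.find?_cons, hk]
        exact ih

theorem pvSetKey_pvSetKey (e : List (String × String)) (k v w : String) :
    pvSetKey (pvSetKey e k v) k w = pvSetKey e k w := by
  induction e with
  | nil => simp [pvSetKey]
  | cons p t ih =>
      obtain ⟨pk, pv⟩ := p
      by_cases hk : pk == k
      · simp [pvSetKey, hk]
      · simp [pvSetKey, hk, ih]

-- the iterated content updates collapse to one update with the folded string
theorem pvFoldSet_eq :
    ∀ (cs : List (List (String × String))) (first : List (String × String)), cs ≠ [] →
      pvFoldSet first cs =
        pvSetKey first "content" (cs.foldl (fun a e => a ++ " " ++ pvG e) (pvG first)) := by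
  intro cs
  induction cs with
  | nil => intro first h; exact absurd rfl h
  | cons e t ih =>
      intro first _
      cases t with
      | nil => simp [pvFoldSet]
      | cons e' t' =>
          have step : pvFoldSet first (e :: e' :: t') =
              pvFoldSet (pvSetKey first "content" (pvG first ++ " " ++ pvG e)) (e' :: t') := by
            simp [pvFoldSet]
          rw [step, ih _ (by simp)]
          rw [pvSetKey_pvSetKey]
          have : pvG (pvSetKey first "content" (pvG first ++ " " ++ pvG e)) =
              pvG first ++ " " ++ pvG e := by
            simp [pvG, pvGetKey_pvSetKey_self]
          rw [this]
          simp [List.foldl_cons]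

-- " ".join(c0 :: cs) is the left fold of the space-append
theorem join_foldl :
    ∀ (cs : List String) (c0 : String),
      PySem.Str.join " " (c0 :: cs) = cs.foldl (fun a c => a ++ " " ++ c) c0 := by
  intro cs
  induction cs with
  | nil => intro c0; simp [PySem.Str.join]
  | cons c t ih =>
      intro c0
      have hstep : PySem.Str.join " " (c0 :: c :: t) =
          PySem.Str.join " " ((c0 ++ " " ++ c) :: t) := by
        cases t with
        | nil => simp [PySem.Str.join, PySem.Chars.join_cons_cons, PySem.Chars.join_singleton]
        | cons d t' => simp [PySem.Str.join, PySem.Chars.join_cons_cons, List.append_assoc]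
      rw [hstep, ih]
      simp [List.foldl_cons]

-- B's collapse of a nonempty run, in the two shapes the main induction meets
theorem collapse_nil_tail (first : List (String × String)) :
    mergeB_collapse [first] = first := by
  simp [mergeB_collapse]

theorem collapse_cons (first : List (String × String)) (tw : List (List (String × String)))
    (h : tw ≠ []) :
    mergeB_collapse (first :: tw) =
      pvSetKey first "content" (PySem.Str.join " " ((first :: tw).map pvG)) := by
  obtain ⟨a, b, rfl⟩ : ∃ a b, tw = a :: b := by
    cases tw with
    | nil => exact absurd rfl h
    | cons a b => exact ⟨a, b, rfl⟩
  simp [mergeB_collapse, pvG]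
  rfl

-- main bridge: the run recursion equals B's group-then-collapse
theorem mergeRec_eq_alt : ∀ (l : List (List (String × String))),
    mergeRec l = merge_dialog_entries_alt l := by
  intro l
  induction l using mergeRec.induct with
  | case1 => simp [mergeRec, merge_dialog_entries_alt]
  | case2 first rest r ih =>
      have hrun := mergeR_run_eq rest first (pvGetKey first "role")
      rw [mergeRec]
      simp only [hrun]
      unfold merge_dialog_entries_alt at ih ⊢
      have hr2 : r.2 = rest.dropWhile (fun e => pvGetKey e "role" == pvGetKey first "role") := by
        show (mergeR_run first (pvGetKey first "role") rest).2 = _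
        rw [hrun]
      rw [hr2] at ih
      have hstart : mergeB_group [] first = [[first]] := by unfold mergeB_group; simp
      rw [List.foldl_cons, hstart, foldl_group_run rest [first] (by simp), pvRRole_cons,
        List.map_cons]
      rw [← ih]
      congr 1
      cases htw : rest.takeWhile (fun e => pvGetKey e "role" == pvGetKey first "role") with
      | nil => simp [pvFoldSet, collapse_nil_tail]
      | cons a b =>
          simp only [List.singleton_append]
          rw [collapse_cons first (a :: b) (by simp), pvFoldSet_eq _ _ (by simp)]
          rw [List.map_cons, join_foldl, List.foldl_map]

-- ===== VERDICT (by name: the statement is the Claim_ definition above) =====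
theorem merge_dialog_entries_spec : Claim_equal_merge_dialog_entries := by
  intro dialog _ _
  unfold Spec_merge_dialog_entries
  rw [a_eq_mergeRec, mergeRec_eq_alt]
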